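-- pv_equiv track=rewrite | github.com/MinhyukHong/Algorithm-Solving | 프로그래머스/0/120813. 짝수는 싫어요/짝수는 싫어요.py | solution
-- ===== SOURCE A (Python) =====
-- def solution(n):
--     answer = []
--     tmp = []
--
--     for i in range(0, n+1):
--         tmp.append(i)
--
--     for j in tmp:
--         if j%2!=0:
--             answer.append(j)
--
--     answer.sort()
--
--     return answer
-- ===== SOURCE B (Python) =====
-- def solution(n):
--     # Generate the odd numbers directly with a step-two range; already ascending, no filter or sort needed.
--     return list(range(1, n + 1, 2))
-- ===== Notes on version B (the rewrite author's own statement) =====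
-- stated objective: idiomatic
-- what changed: B generates the odd numbers directly with a step-two range instead of materialising the full range, filtering by parity and sorting; measured faster in a timing run.
import Mathlib
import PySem

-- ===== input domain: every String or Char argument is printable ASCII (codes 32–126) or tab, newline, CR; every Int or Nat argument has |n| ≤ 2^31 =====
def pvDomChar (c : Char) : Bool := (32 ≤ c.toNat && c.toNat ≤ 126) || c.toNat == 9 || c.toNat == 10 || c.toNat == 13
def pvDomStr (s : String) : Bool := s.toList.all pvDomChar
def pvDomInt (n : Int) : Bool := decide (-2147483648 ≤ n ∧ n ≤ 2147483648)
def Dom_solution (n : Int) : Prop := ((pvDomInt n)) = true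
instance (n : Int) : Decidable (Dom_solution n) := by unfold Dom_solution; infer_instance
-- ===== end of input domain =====

-- B replaces A's build-0..n / parity-filter / sort passes by generating the odd numbers directly with a step-2 range (idiomatic).

-- ===== PORT A =====
def solution (n : Int) : List Int :=
  let tmp := (PySem.List.pyRange 0 (n+1) 1).foldl (fun acc i => acc ++ [i]) []
  let answer := tmp.foldl (fun acc j => if PySem.Int.mod j 2 ≠ 0 then acc ++ [j] else acc) []
  PySem.List.sorted answer (fun x => x)

-- ===== PORT B =====
def solution_alt (n : Int) : List Int :=
  PySem.List.pyRange 1 (n+1) 2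

-- ===== PRECONDITION & SPEC =====
def Spec_solution (n : Int) (out : List Int) : Prop := out = solution_alt n
instance (n : Int) (out : List Int) : Decidable (Spec_solution n out) := by unfold Spec_solution; infer_instance

-- ===== CLAIM (what is proved, stated in full; the proofs are below) =====
def Claim_equal_solution : Prop := ∀ (n : Int), Dom_solution n → Spec_solution n (solution n)

-- ===== LEMMAS AND PROOFS =====

-- The filtered 0..n range has exactly the members of the step-2 range, both strictly increasing.
theorem pvFilter_eq_pyRange_two (b : Int) :
    (PySem.List.pyRange 0 b 1).filter (fun j => decide (PySem.Int.mod j 2 ≠ 0))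
      = PySem.List.pyRange 1 b 2 := by
  have hs : (0:Int) < 2 := by norm_num
  -- strict sortedness of both sides
  have hL : ((PySem.List.pyRange 0 b 1).filter
      (fun j => decide (PySem.Int.mod j 2 ≠ 0))).Pairwise (· < ·) :=
    (PySem.List.pairwise_lt_pyRange_one 0 b).filter _
  have hR : (PySem.List.pyRange 1 b 2).Pairwise (· < ·) := by
    rw [PySem.List.pyRange_of_pos 1 b hs]
    refine List.Pairwise.map _ (fun k l hkl => ?_) (List.pairwise_lt_range)
    omega
  have hmem : ∀ x : Int,
      (x ∈ (PySem.List.pyRange 0 b 1).filter (fun j => decide (PySem.Int.mod j 2 ≠ 0)))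
        ↔ x ∈ PySem.List.pyRange 1 b 2 := by
    intro x
    rw [List.mem_filter, PySem.List.mem_pyRange_one,
        PySem.List.mem_pyRange_iff_of_pos hs x]
    simp only [decide_eq_true_eq]
    constructor
    · rintro ⟨⟨h0, hb⟩, hm⟩
      rw [Ne, PySem.Int.mod_eq_zero_iff_dvd] at hm
      refine ⟨by omega, hb, ?_⟩
      omega
    · rintro ⟨h1, hb, hd⟩
      refine ⟨⟨by omega, hb⟩, ?_⟩
      rw [Ne, PySem.Int.mod_eq_zero_iff_dvd]
      omega
  exact List.Perm.eq_of_pairwise (fun a b _ _ h1 h2 => le_antisymm h1 h2)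
    (hL.imp le_of_lt) (hR.imp le_of_lt)
    ((List.perm_ext_iff_of_nodup (hL.imp (fun h => ne_of_lt h))
      (hR.imp (fun h => ne_of_lt h))).2 hmem)

-- ===== VERDICT (by name: the statement is the Claim_ definition above) =====
theorem solution_spec : Claim_equal_solution := by
  intro n _
  unfold Spec_solution solution solution_alt
  simp only [PySem.List.foldl_append_singleton_eq_self, List.nil_append,
    PySem.List.foldl_append_ite_eq_filter]
  rw [pvFilter_eq_pyRange_two]
  exact PySem.List.sorted_eq_self_of_pairwise _ _
    (by
      have := (PySem.List.pairwise_lt_pyRange_one 0 (n+1)).filter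
        (fun j => decide (PySem.Int.mod j 2 ≠ 0))
      rw [pvFilter_eq_pyRange_two] at this
      exact this.imp le_of_lt)
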